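-- pv_equiv track=rewrite | github.com/jules-richemont/Algorithmic | ProjetFinal.py | align_lettre_mot
-- ===== SOURCE A (Python) =====
-- def c_sub(a,b):
--     if(a==b):
--         return 0
--     elif a == "A" and b == "T" or a == "T" and b == "A":
--         return 3
--     elif a == "C" and b == "G" or a == "G" and b == "C":
--         return 3
--     else:
--         return 4
--
-- def mot_gaps(k):
--     return k*'-'
--
-- def align_lettre_mot(x,y):
--     m=len(y)
--     i = 0
--     while i < m:
--         if y[i] == x :
--             return (mot_gaps(i)+x+mot_gaps(m-i-1) , y)  # Cas trivial
--         i += 1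
--
--     i = 0
--     while i < m :
--         if c_sub(x, y[i]) == 3 :
--             return (mot_gaps(i)+x+mot_gaps(m-i-1) , y)
--         i += 1
--     if i==m :
--         return (mot_gaps(i-1)+str(x) , y)
-- ===== SOURCE B (Python) =====
-- def c_sub(a,b):
--     if(a==b):
--         return 0
--     elif a == "A" and b == "T" or a == "T" and b == "A":
--         return 3
--     elif a == "C" and b == "G" or a == "G" and b == "C":
--         return 3
--     else:
--         return 4
--
-- def mot_gaps(k):
--     return k*'-'
--
-- def align_lettre_mot(x, y):
--     m = len(y)
--     first_exact = None
--     first_sub = None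
--     for i, ch in enumerate(y):
--         if first_exact is None and ch == x:
--             first_exact = i
--         if first_sub is None and c_sub(x, ch) == 3:
--             first_sub = i
--     if first_exact is not None:
--         i = first_exact
--     elif first_sub is not None:
--         i = first_sub
--     else:
--         return (mot_gaps(m-1) + str(x), y)
--     return (mot_gaps(i) + x + mot_gaps(m-i-1), y)
-- ===== Notes on version B (the rewrite author's own statement) =====
-- stated objective: alternative
-- what changed: Replaces A's two sequential scan-and-return while loops (exact match pass, then substitution pass) by a single pass over enumerate(y) that records first_exact and first_sub once each, choosing the position afterwards.
import Mathlib
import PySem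

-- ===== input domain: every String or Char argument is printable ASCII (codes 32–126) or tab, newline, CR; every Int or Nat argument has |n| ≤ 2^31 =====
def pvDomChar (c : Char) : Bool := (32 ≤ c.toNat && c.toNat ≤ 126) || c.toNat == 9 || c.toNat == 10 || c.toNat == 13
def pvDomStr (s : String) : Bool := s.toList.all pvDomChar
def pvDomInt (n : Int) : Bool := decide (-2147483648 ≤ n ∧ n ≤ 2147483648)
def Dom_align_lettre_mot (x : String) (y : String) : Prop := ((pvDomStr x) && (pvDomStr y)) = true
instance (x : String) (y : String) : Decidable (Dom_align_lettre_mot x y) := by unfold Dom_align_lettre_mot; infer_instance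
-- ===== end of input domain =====

-- B replaces A's two sequential early-return scans by one pass recording first_exact / first_sub; alternative decomposition, same cost.

-- ===== PORT A =====
-- c_sub(a,b) : branch for branch
def c_subP (a b : String) : Int :=
  if a == b then 0
  else if (a == "A" && b == "T") || (a == "T" && b == "A") then 3
  else if (a == "C" && b == "G") || (a == "G" && b == "C") then 3
  else 4

-- mot_gaps(k) = k*'-' (negative k gives the empty string, as Nat subtraction clamps at the call sites)
def gapsP (k : Nat) : List Char := List.replicate k '-'

-- first while loop: "while i < m: if y[i] == x: return … ; i += 1" — returns the index where it returned, if any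
def alignLoopExact (x : String) (i : Nat) : List Char → Option Nat
  | [] => none
  | c :: cs => if String.ofList [c] == x then some i else alignLoopExact x (i+1) cs

-- second while loop: "while i < m: if c_sub(x, y[i]) == 3: return … ; i += 1"
def alignLoopSub (x : String) (i : Nat) : List Char → Option Nat
  | [] => none
  | c :: cs => if c_subP x (String.ofList [c]) == 3 then some i else alignLoopSub x (i+1) cs

def align_lettre_mot (x : String) (y : String) : String × String :=
  let ys := y.toList
  let m := ys.length
  match alignLoopExact x 0 ys with
  | some i => (String.ofList (gapsP i ++ x.toList ++ gapsP (m - i - 1)), y)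
  | none =>
    match alignLoopSub x 0 ys with
    | some i => (String.ofList (gapsP i ++ x.toList ++ gapsP (m - i - 1)), y)
    | none => (String.ofList (gapsP (m - 1) ++ x.toList), y)

-- ===== PORT B =====
-- the body of "for i, ch in enumerate(y)": set first_exact / first_sub once each
def altStep (x : String) (acc : Nat × Option Nat × Option Nat) (c : Char) : Nat × Option Nat × Option Nat :=
  let (i, fe, fs) := acc
  (i + 1,
   if fe.isNone && String.ofList [c] == x then some i else fe,
   if fs.isNone && c_subP x (String.ofList [c]) == 3 then some i else fs)

def align_lettre_mot_alt (x : String) (y : String) : String × String :=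
  let ys := y.toList
  let m := ys.length
  let r := ys.foldl (altStep x) (0, none, none)
  match r.2.1, r.2.2 with
  | some i, _ => (String.ofList (gapsP i ++ x.toList ++ gapsP (m - i - 1)), y)
  | none, some i => (String.ofList (gapsP i ++ x.toList ++ gapsP (m - i - 1)), y)
  | none, none => (String.ofList (gapsP (m - 1) ++ x.toList), y)

-- ===== PRECONDITION & SPEC =====
def Spec_align_lettre_mot (x : String) (y : String) (out : String × String) : Prop := out = align_lettre_mot_alt x y
instance (x : String) (y : String) (out : String × String) : Decidable (Spec_align_lettre_mot x y out) := by unfold Spec_align_lettre_mot; infer_instance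

-- ===== CLAIM (what is proved, stated in full; the proofs are below) =====
def Claim_equal_align_lettre_mot : Prop := ∀ (x : String) (y : String), Dom_align_lettre_mot x y → Spec_align_lettre_mot x y (align_lettre_mot x y)

-- ===== LEMMAS AND PROOFS =====

-- once an accumulator slot is 'some', the fold keeps it
theorem foldl_altStep_fst_some (x : String) (ys : List Char) :
    ∀ (i j : Nat) (fs : Option Nat), (ys.foldl (altStep x) (i, some j, fs)).2.1 = some j := by
  induction ys with
  | nil => intro i j fs; rfl
  | cons c cs ih => intro i j fs; simp [List.foldl, altStep, ih]

theorem foldl_altStep_snd_some (x : String) (ys : List Char) :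
    ∀ (i j : Nat) (fe : Option Nat), (ys.foldl (altStep x) (i, fe, some j)).2.2 = some j := by
  induction ys with
  | nil => intro i j fe; rfl
  | cons c cs ih =>
    intro i j fe
    simp only [List.foldl, altStep]
    cases fe <;> simp [ih]

-- the first accumulator computes exactly A's first while loop
theorem foldl_altStep_fst (x : String) (ys : List Char) :
    ∀ (i : Nat) (fs : Option Nat), (ys.foldl (altStep x) (i, none, fs)).2.1 = alignLoopExact x i ys := by
  induction ys with
  | nil => intro i fs; rfl
  | cons c cs ih =>
    intro i fs
    simp only [List.foldl, altStep, alignLoopExact, Option.isNone_none, Bool.true_and]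
    by_cases h : String.ofList [c] = x
    · simp [h, foldl_altStep_fst_some]
    · simp [h, ih]

-- the second accumulator computes exactly A's second while loop
theorem foldl_altStep_snd (x : String) (ys : List Char) :
    ∀ (i : Nat) (fe : Option Nat), (ys.foldl (altStep x) (i, fe, none)).2.2 = alignLoopSub x i ys := by
  induction ys with
  | nil => intro i fe; rfl
  | cons c cs ih =>
    intro i fe
    simp only [List.foldl, altStep, alignLoopSub, Option.isNone_none, Bool.true_and]
    by_cases h : c_subP x (String.ofList [c]) = 3
    · cases fe <;> simp [h, foldl_altStep_snd_some]
    · cases fe <;> simp [h, ih]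

-- ===== VERDICT (by name: the statement is the Claim_ definition above) =====
theorem align_lettre_mot_spec : Claim_equal_align_lettre_mot := by
  intro x y _
  unfold Spec_align_lettre_mot align_lettre_mot align_lettre_mot_alt
  simp only
  rw [show (y.toList.foldl (altStep x) (0, none, none)).2.1 = alignLoopExact x 0 y.toList from
        foldl_altStep_fst x y.toList 0 none,
      show (y.toList.foldl (altStep x) (0, none, none)).2.2 = alignLoopSub x 0 y.toList from
        foldl_altStep_snd x y.toList 0 none]
  cases alignLoopExact x 0 y.toList <;> cases alignLoopSub x 0 y.toList <;> rfl
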